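-- pv_equiv track=rewrite | github.com/RISCSoftware/inprossa | wp2/source/minizinc/NL2DSL/structures_utils.py | split_at_outer_equals
-- ===== SOURCE A (Python) =====
-- def split_at_outer_equals(s: str):
--     depth = 0
--     for i, ch in enumerate(s):
--         if ch == "(":
--             depth += 1
--         elif ch == ")":
--             depth -= 1
--         elif ch == "=" and depth == 0:
--             left = s[:i].rstrip()
--             right = s[i + 1:].lstrip()
--             return left, right
--     return s, ""
-- ===== SOURCE B (Python) =====
-- def split_at_outer_equals(s: str):
--     i = next((i for i, c in enumerate(s)
--               if c == "=" and s[:i].count("(") == s[:i].count(")")), None)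
--     if i is None:
--         return s, ""
--     return s[:i].rstrip(), s[i + 1:].lstrip()
-- ===== Notes on version B (the rewrite author's own statement) =====
-- stated objective: alternative
-- what changed: Instead of scanning with a running depth accumulator, B searches for the first '=' whose prefix has equal '(' and ')' counts (generator + next), then slices/strips once.
import Mathlib
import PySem

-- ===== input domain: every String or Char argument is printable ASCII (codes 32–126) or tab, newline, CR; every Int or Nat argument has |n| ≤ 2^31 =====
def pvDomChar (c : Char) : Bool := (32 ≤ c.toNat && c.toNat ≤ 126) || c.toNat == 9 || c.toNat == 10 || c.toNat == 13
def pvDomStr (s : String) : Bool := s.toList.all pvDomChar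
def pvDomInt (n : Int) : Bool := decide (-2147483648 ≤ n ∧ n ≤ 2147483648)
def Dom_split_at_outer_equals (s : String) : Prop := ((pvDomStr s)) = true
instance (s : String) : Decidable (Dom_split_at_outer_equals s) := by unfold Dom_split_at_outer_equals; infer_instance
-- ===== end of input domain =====

-- B replaces A's running depth counter by a direct search for the first '=' whose prefix has
-- balanced parentheses (prefix paren counts instead of an accumulator); alternative decomposition, same result.


-- ===== PORT A =====
-- for i, ch in enumerate(s): maintain depth; return at first outer-level '='
def aLoop (s : String) (l : List (Int × Char)) (depth : Int) : String × String :=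
  match l with
  | [] => (s, "")
  | (i, ch) :: rest =>
    if ch = '(' then aLoop s rest (depth + 1)
    else if ch = ')' then aLoop s rest (depth - 1)
    else if ch = '=' ∧ depth = 0 then
      (PySem.Str.rstrip (PySem.Str.slice s none (some i)),
       PySem.Str.lstrip (PySem.Str.slice s (some (i + 1)) none))
    else aLoop s rest depth

def split_at_outer_equals (s : String) : String × String :=
  aLoop s (PySem.List.enumerate s.toList 0) 0

-- ===== PORT B =====
-- next((i for i, c in enumerate(s) if c == '=' and s[:i].count('(') == s[:i].count(')')), None)
def altFind (cs : List Char) : Option Int :=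
  (PySem.List.enumerate cs 0).findSome? (fun p =>
    if p.2 = '=' ∧ (PySem.List.slice cs none (some p.1)).count '('
                 = (PySem.List.slice cs none (some p.1)).count ')'
    then some p.1 else none)

-- the final `if i is None … return …` of Source B
def altRender (s : String) (i? : Option Int) : String × String :=
  match i? with
  | none => (s, "")
  | some i => (PySem.Str.rstrip (PySem.Str.slice s none (some i)),
               PySem.Str.lstrip (PySem.Str.slice s (some (i + 1)) none))

def split_at_outer_equals_alt (s : String) : String × String :=
  altRender s (altFind s.toList)

-- ===== PRECONDITION & SPEC =====
def Spec_split_at_outer_equals (s : String) (out : String × String) : Prop := out = split_at_outer_equals_alt s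
instance (s : String) (out : String × String) : Decidable (Spec_split_at_outer_equals s out) := by unfold Spec_split_at_outer_equals; infer_instance

-- ===== CLAIM (what is proved, stated in full; the proofs are below) =====
def Claim_equal_split_at_outer_equals : Prop := ∀ (s : String), Dom_split_at_outer_equals s → Spec_split_at_outer_equals s (split_at_outer_equals s)

-- ===== LEMMAS AND PROOFS =====

-- B's per-position test, as a function of the full character list
def altPred (cs : List Char) (p : Int × Char) : Option Int :=
  if p.2 = '=' ∧ (PySem.List.slice cs none (some p.1)).count '('
               = (PySem.List.slice cs none (some p.1)).count ')'
  then some p.1 else none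

lemma altFind_eq (cs : List Char) :
    altFind cs = (PySem.List.enumerate cs 0).findSome? (altPred cs) := rfl

-- main loop invariant: A's depth equals the signed paren count of the processed prefix,
-- and from any suffix both searches agree
lemma key (s : String) : ∀ (m k : Nat), m = s.toList.length - k →
    aLoop s (PySem.List.enumerate (s.toList.drop k) (k : Int))
      (((s.toList.take k).count '(' : Int) - ((s.toList.take k).count ')' : Int))
    = altRender s ((PySem.List.enumerate (s.toList.drop k) (k : Int)).findSome? (altPred s.toList)) := by
  intro m
  induction m with
  | zero =>
    intro k hk
    have hge : s.toList.length ≤ k := by omega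
    rw [List.drop_eq_nil_of_le hge]
    simp [PySem.List.enumerate, aLoop, altRender]
  | succ n ih =>
    intro k hk
    by_cases hlt : k < s.toList.length
    · have hdrop : s.toList.drop k = s.toList[k] :: s.toList.drop (k + 1) :=
        List.drop_eq_getElem_cons hlt
      have htake : s.toList.take (k + 1) = s.toList.take k ++ [s.toList[k]] := by
        rw [List.take_add_one]
        simp [List.getElem?_eq_getElem hlt]
      have hcast : ((k : Int) + 1) = ((k + 1 : Nat) : Int) := by push_cast; ring
      rw [hdrop, PySem.List.enumerate_cons]
      set c := s.toList[k] with hc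
      by_cases h1 : c = '('
      · have hpred : altPred s.toList ((k : Int), c) = none := by
          simp [altPred, h1]
        rw [List.findSome?_cons_of_isNone (by simp [hpred])]
        show aLoop s (((k:Int), c) :: _) _ = _
        rw [aLoop]
        simp only [h1, if_pos rfl]
        have : ((s.toList.take k).count '(' : Int) - ((s.toList.take k).count ')' : Int) + 1
             = ((s.toList.take (k+1)).count '(' : Int) - ((s.toList.take (k+1)).count ')' : Int) := by
          rw [htake]; simp [List.count_append, h1]; push_cast; ring
        rw [this, hcast]
        exact ih (k + 1) (by omega)
      · by_cases h2 : c = ')'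
        · have hpred : altPred s.toList ((k : Int), c) = none := by
            simp [altPred, h2]
          rw [List.findSome?_cons_of_isNone (by simp [hpred])]
          show aLoop s (((k:Int), c) :: _) _ = _
          rw [aLoop]
          simp only [h1, h2, if_neg h1, if_pos rfl]
          have : ((s.toList.take k).count '(' : Int) - ((s.toList.take k).count ')' : Int) - 1
               = ((s.toList.take (k+1)).count '(' : Int) - ((s.toList.take (k+1)).count ')' : Int) := by
            rw [htake]; simp [List.count_append, h1, h2]; push_cast; ring
          rw [this, hcast]
          exact ih (k + 1) (by omega)
        · have hslice : PySem.List.slice s.toList none (some (k : Int)) = s.toList.take k :=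
            PySem.List.slice_to_natCast _ _
          by_cases h3 : c = '=' ∧ ((s.toList.take k).count '(' : Int) - ((s.toList.take k).count ')' : Int) = 0
          · have hcnt : (s.toList.take k).count '(' = (s.toList.take k).count ')' := by
              omega
            have hpred : altPred s.toList ((k : Int), c) = some (k : Int) := by
              simp [altPred, hslice, h3.1, hcnt]
            rw [List.findSome?_cons_of_isSome (by simp [hpred])]
            show aLoop s (((k:Int), c) :: _) _ = _
            rw [aLoop]
            simp only [if_neg h1, if_neg h2, if_pos h3]
            simp [altRender, hpred]
          · have hpred : altPred s.toList ((k : Int), c) = none := by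
              by_cases hce : c = '='
              · have : ¬ (s.toList.take k).count '(' = (s.toList.take k).count ')' := by
                  intro hcc
                  exact h3 ⟨hce, by omega⟩
                simp [altPred, hslice, hce, this]
              · simp [altPred, hce]
            rw [List.findSome?_cons_of_isNone (by simp [hpred])]
            show aLoop s (((k:Int), c) :: _) _ = _
            rw [aLoop]
            simp only [if_neg h1, if_neg h2, if_neg h3]
            have e1 : (s.toList.take (k + 1)).count '(' = (s.toList.take k).count '(' := by
              rw [htake]; simp [List.count_append, h1]
            have e2 : (s.toList.take (k + 1)).count ')' = (s.toList.take k).count ')' := by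
              rw [htake]; simp [List.count_append, h2]
            have hih := ih (k + 1) (by omega)
            rw [e1, e2] at hih
            rw [hcast]
            exact hih
    · omega

-- ===== VERDICT (by name: the statement is the Claim_ definition above) =====
theorem split_at_outer_equals_spec : Claim_equal_split_at_outer_equals := by
  intro s _
  show split_at_outer_equals s = split_at_outer_equals_alt s
  unfold split_at_outer_equals split_at_outer_equals_alt
  rw [altFind_eq]
  have h := key s (s.toList.length) 0 (by omega)
  simpa using h
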